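-- pv_equiv track=rewrite | github.com/Akhilkokani/Solving-Hackerrank-Problem-Statements | 2020/beautiful_triplets.py | beautifulTriplets
-- ===== SOURCE A (Python) =====
-- def beautifulTriplets(d, arr):
--     bt = 0
--     for i in arr:
--         extra = 0
--         if i > 0 and (abs(i-d) in arr) and (abs(i-d)-d in arr):
--             if arr.count(i) > 1: extra = arr.count(i)
--             if arr.count(abs(i-d)) > 1: extra += arr.count(abs(i-d))
--             if arr.count(abs(i-d)-d) > 1: extra += arr.count(abs(i-d)-d)
--             if extra > 0: bt += extra
--             else: bt += 1
--     return bt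
-- ===== SOURCE B (Python) =====
-- def beautifulTriplets(d, arr):
--     c = {}
--     for x in arr:
--         c[x] = c.get(x, 0) + 1
--     bt = 0
--     for v, n in c.items():
--         if v > 0 and abs(v - d) in c and abs(v - d) - d in c:
--             extra = 0
--             if c[v] > 1:
--                 extra = c[v]
--             n2 = c.get(abs(v - d), 0)
--             if n2 > 1:
--                 extra += n2
--             n3 = c.get(abs(v - d) - d, 0)
--             if n3 > 1:
--                 extra += n3
--             bt += n * (extra if extra > 0 else 1)
--     return bt
-- ===== Notes on version B (the rewrite author's own statement) =====
-- stated objective: alternative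
-- what changed: B builds a count dictionary in one pass and iterates over the distinct values only, weighting each value's single contribution by its multiplicity, instead of A's per-element loop with repeated arr.count/in scans.
import Mathlib
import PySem

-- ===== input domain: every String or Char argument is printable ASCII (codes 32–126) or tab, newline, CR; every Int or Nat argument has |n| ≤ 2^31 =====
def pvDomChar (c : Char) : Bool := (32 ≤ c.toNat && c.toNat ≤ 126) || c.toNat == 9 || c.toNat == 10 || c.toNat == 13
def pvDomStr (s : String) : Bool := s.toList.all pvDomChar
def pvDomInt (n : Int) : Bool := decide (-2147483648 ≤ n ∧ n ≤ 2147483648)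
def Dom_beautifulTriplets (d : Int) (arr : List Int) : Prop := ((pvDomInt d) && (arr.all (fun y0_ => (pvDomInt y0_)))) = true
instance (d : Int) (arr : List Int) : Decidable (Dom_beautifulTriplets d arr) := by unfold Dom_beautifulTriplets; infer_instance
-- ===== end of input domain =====

-- B counts every value once into a dict and loops over the distinct values only, weighting each
-- value's single contribution by its multiplicity (objective: alternative — a distinct-value
-- traversal with dict lookups instead of A's per-element loop with repeated list scans).

-- ===== PORT A =====
-- Python's abs on ints (kernel-reducible)
def pyAbs (x : Int) : Int := if x < 0 then -x else x

def beautifulTriplets (d : Int) (arr : List Int) : Int :=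
  arr.foldl (fun bt i =>
    let extra : Int := 0
    if i > 0 ∧ pyAbs (i - d) ∈ arr ∧ pyAbs (i - d) - d ∈ arr then
      let extra := if (PySem.List.count arr i : Int) > 1 then (PySem.List.count arr i : Int) else extra
      let extra := if (PySem.List.count arr (pyAbs (i - d)) : Int) > 1 then extra + (PySem.List.count arr (pyAbs (i - d)) : Int) else extra
      let extra := if (PySem.List.count arr (pyAbs (i - d) - d) : Int) > 1 then extra + (PySem.List.count arr (pyAbs (i - d) - d) : Int) else extra
      if extra > 0 then bt + extra else bt + 1
    else bt) 0

-- ===== PORT B =====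
def beautifulTriplets_alt (d : Int) (arr : List Int) : Int :=
  let c : PySem.Dict Int Int := arr.foldl (fun c x => c.insert x (c.getD x 0 + 1)) PySem.Dict.empty
  c.items.foldl (fun bt p =>
    let v := p.1
    let n := p.2
    if v > 0 ∧ c.contains (pyAbs (v - d)) ∧ c.contains (pyAbs (v - d) - d) then
      let extra : Int := 0
      let extra := if c.getD v 0 > 1 then c.getD v 0 else extra
      let n2 := c.getD (pyAbs (v - d)) 0
      let extra := if n2 > 1 then extra + n2 else extra
      let n3 := c.getD (pyAbs (v - d) - d) 0
      let extra := if n3 > 1 then extra + n3 else extra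
      bt + n * (if extra > 0 then extra else 1)
    else bt) 0

-- ===== PRECONDITION & SPEC =====
def Spec_beautifulTriplets (d : Int) (arr : List Int) (out : Int) : Prop := out = beautifulTriplets_alt d arr
instance (d : Int) (arr : List Int) (out : Int) : Decidable (Spec_beautifulTriplets d arr out) := by unfold Spec_beautifulTriplets; infer_instance

-- ===== CLAIM (what is proved, stated in full; the proofs are below) =====
def Claim_equal_beautifulTriplets : Prop := ∀ (d : Int) (arr : List Int), Dom_beautifulTriplets d arr → Spec_beautifulTriplets d arr (beautifulTriplets d arr)

-- ===== LEMMAS AND PROOFS =====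

-- the per-value contribution that both loops compute for a value i of arr
def pvContrib (d : Int) (arr : List Int) (i : Int) : Int :=
  if i > 0 ∧ pyAbs (i - d) ∈ arr ∧ pyAbs (i - d) - d ∈ arr then
    let extra : Int := 0
    let extra := if (PySem.List.count arr i : Int) > 1 then (PySem.List.count arr i : Int) else extra
    let extra := if (PySem.List.count arr (pyAbs (i - d)) : Int) > 1 then extra + (PySem.List.count arr (pyAbs (i - d)) : Int) else extra
    let extra := if (PySem.List.count arr (pyAbs (i - d) - d) : Int) > 1 then extra + (PySem.List.count arr (pyAbs (i - d) - d) : Int) else extra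
    if extra > 0 then extra else 1
  else 0

-- A's loop body adds pvContrib of the current element
lemma bodyA_eq (d : Int) (arr : List Int) (bt i : Int) :
    (let extra : Int := 0
     if i > 0 ∧ pyAbs (i - d) ∈ arr ∧ pyAbs (i - d) - d ∈ arr then
       let extra := if (PySem.List.count arr i : Int) > 1 then (PySem.List.count arr i : Int) else extra
       let extra := if (PySem.List.count arr (pyAbs (i - d)) : Int) > 1 then extra + (PySem.List.count arr (pyAbs (i - d)) : Int) else extra
       let extra := if (PySem.List.count arr (pyAbs (i - d) - d) : Int) > 1 then extra + (PySem.List.count arr (pyAbs (i - d) - d) : Int) else extra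
       if extra > 0 then bt + extra else bt + 1
     else bt) = bt + pvContrib d arr i := by
  simp only [pvContrib]
  split_ifs <;> omega

-- A is the sum of pvContrib over all elements
lemma A_eq_sum (d : Int) (arr : List Int) :
    beautifulTriplets d arr = (arr.map (pvContrib d arr)).sum := by
  unfold beautifulTriplets
  have h : (fun (bt i : Int) =>
      let extra : Int := 0
      if i > 0 ∧ pyAbs (i - d) ∈ arr ∧ pyAbs (i - d) - d ∈ arr then
        let extra := if (PySem.List.count arr i : Int) > 1 then (PySem.List.count arr i : Int) else extra
        let extra := if (PySem.List.count arr (pyAbs (i - d)) : Int) > 1 then extra + (PySem.List.count arr (pyAbs (i - d)) : Int) else extra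
        let extra := if (PySem.List.count arr (pyAbs (i - d) - d) : Int) > 1 then extra + (PySem.List.count arr (pyAbs (i - d) - d) : Int) else extra
        if extra > 0 then bt + extra else bt + 1
      else bt) = fun bt i => bt + pvContrib d arr i :=
    funext fun bt => funext fun i => bodyA_eq d arr bt i
  rw [h, PySem.List.foldl_add]
  simp

-- B's loop body at a distinct value v (with its count) adds count v * pvContrib v
lemma bodyB_eq (d : Int) (arr : List Int) (bt v : Int) :
    (if v > 0 ∧ (PySem.Dict.counter arr).contains (pyAbs (v - d)) ∧ (PySem.Dict.counter arr).contains (pyAbs (v - d) - d) then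
      let extra : Int := 0
      let extra := if (PySem.Dict.counter arr).getD v 0 > 1 then (PySem.Dict.counter arr).getD v 0 else extra
      let n2 := (PySem.Dict.counter arr).getD (pyAbs (v - d)) 0
      let extra := if n2 > 1 then extra + n2 else extra
      let n3 := (PySem.Dict.counter arr).getD (pyAbs (v - d) - d) 0
      let extra := if n3 > 1 then extra + n3 else extra
      bt + (arr.count v : Int) * (if extra > 0 then extra else 1)
    else bt) = bt + (arr.count v : Int) * pvContrib d arr v := by
  simp only [pvContrib, PySem.Dict.getD_counter, PySem.Dict.contains_counter,
    PySem.List.count_eq, List.contains_iff_mem]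
  split_ifs <;> ring

-- B is the count-weighted sum of pvContrib over the distinct values
lemma B_eq_sum (d : Int) (arr : List Int) :
    beautifulTriplets_alt d arr
      = ((PySem.Set.ofList arr).map (fun v => (arr.count v : Int) * pvContrib d arr v)).sum := by
  unfold beautifulTriplets_alt
  simp only [PySem.Dict.foldl_insert_getD_add_one_eq_counter, PySem.Dict.items_counter,
    List.foldl_map]
  have h : (fun (bt : Int) (v : Int) =>
      if v > 0 ∧ (PySem.Dict.counter arr).contains (pyAbs (v - d)) ∧ (PySem.Dict.counter arr).contains (pyAbs (v - d) - d) then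
        let extra : Int := 0
        let extra := if (PySem.Dict.counter arr).getD v 0 > 1 then (PySem.Dict.counter arr).getD v 0 else extra
        let n2 := (PySem.Dict.counter arr).getD (pyAbs (v - d)) 0
        let extra := if n2 > 1 then extra + n2 else extra
        let n3 := (PySem.Dict.counter arr).getD (pyAbs (v - d) - d) 0
        let extra := if n3 > 1 then extra + n3 else extra
        bt + (arr.count v : Int) * (if extra > 0 then extra else 1)
      else bt) = fun bt v => bt + (arr.count v : Int) * pvContrib d arr v :=
    funext fun bt => funext fun v => bodyB_eq d arr bt v
  rw [h, PySem.List.foldl_add]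
  simp

-- summing over all elements = summing over distinct values weighted by multiplicity
lemma sum_eq_weighted_dedup (arr : List Int) (f : Int → Int) :
    (arr.map f).sum = ((PySem.Set.ofList arr).map (fun v => (arr.count v : Int) * f v)).sum := by
  rw [Finset.sum_list_map_count]
  have hnd : (PySem.Set.ofList arr : List Int).Nodup := by
    rw [← PySem.List.dedup_eq_ofList]; exact PySem.List.nodup_dedup arr
  have htf : (PySem.Set.ofList arr : List Int).toFinset = arr.toFinset := by
    apply Finset.ext; intro x
    simp [← PySem.List.dedup_eq_ofList, PySem.List.mem_dedup]
  rw [← List.sum_toFinset _ hnd, htf]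
  apply Finset.sum_congr rfl
  intro x hx
  simp

-- ===== VERDICT (by name: the statement is the Claim_ definition above) =====
theorem beautifulTriplets_spec : Claim_equal_beautifulTriplets := by
  intro d arr _
  unfold Spec_beautifulTriplets
  rw [A_eq_sum, B_eq_sum, sum_eq_weighted_dedup]
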